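-- pv_equiv track=rewrite | github.com/NeurodataWithoutBorders/lindi | lindi/LindiH5ZarrStore/_util.py | _get_chunk_names_for_dataset
-- ===== SOURCE A (Python) =====
-- from typing import IO, List, Callable
--
-- def _get_chunk_names_for_dataset(chunk_coords_shape: List[int]) -> List[str]:
--     """Get the chunk names for a dataset with the given chunk coords shape.
--
--     For example: _get_chunk_names_for_dataset([1, 2, 3]) returns
--     ['0.0.0', '0.0.1', '0.0.2', '0.1.0', '0.1.1', '0.1.2']
--     """
--     ndim = len(chunk_coords_shape)
--     if ndim == 0:
--         return ["0"]
--     elif ndim == 1: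
--         return [str(i) for i in range(chunk_coords_shape[0])]
--     else:
--         names0 = _get_chunk_names_for_dataset(chunk_coords_shape[1:])
--         names = []
--         for i in range(chunk_coords_shape[0]):
--             for name0 in names0:
--                 names.append(f"{i}.{name0}")
--         return names
-- ===== SOURCE B (Python) =====
-- def _get_chunk_names_for_dataset(chunk_coords_shape):
--     """Get the chunk names for a dataset with the given chunk coords shape."""
--     if len(chunk_coords_shape) == 0:
--         return ["0"]
--     if any(s <= 0 for s in chunk_coords_shape):
--         return []
--     names = [str(i) for i in range(chunk_coords_shape[0])]
--     for s in chunk_coords_shape[1:]: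
--         names = [p + "." + str(i) for p in names for i in range(s)]
--     return names
-- ===== Notes on version B (the rewrite author's own statement) =====
-- stated objective: alternative
-- what changed: Replaces A's suffix-building recursion (recurse on the tail, then nested loops prepending each first-dimension index) with a single iterative left-to-right fold that extends prefixes dimension by dimension with a flat comprehension.
import Mathlib
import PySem

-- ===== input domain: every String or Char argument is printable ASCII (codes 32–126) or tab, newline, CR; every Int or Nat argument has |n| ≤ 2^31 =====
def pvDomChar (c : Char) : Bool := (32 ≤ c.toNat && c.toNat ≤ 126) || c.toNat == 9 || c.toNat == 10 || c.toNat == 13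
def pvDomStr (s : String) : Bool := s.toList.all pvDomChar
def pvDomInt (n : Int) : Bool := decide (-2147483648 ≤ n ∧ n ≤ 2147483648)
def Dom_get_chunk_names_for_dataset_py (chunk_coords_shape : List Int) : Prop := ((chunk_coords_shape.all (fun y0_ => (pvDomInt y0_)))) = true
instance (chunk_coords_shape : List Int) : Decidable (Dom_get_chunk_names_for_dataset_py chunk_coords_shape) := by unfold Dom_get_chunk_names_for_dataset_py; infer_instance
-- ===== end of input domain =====

-- B replaces A's suffix-building recursion with a single left-to-right prefix-extending fold (alternative decomposition, same cost).

-- ===== PORT A =====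
-- A recurses on the tail, then nested loops prepend each first-dimension index.
def get_chunk_names_for_dataset_py (chunk_coords_shape : List Int) : List String :=
  match chunk_coords_shape with
  | [] => ["0"]
  | [n] => (PySem.List.pyRange 0 n 1).map (fun i => PySem.Int.toStr i)
  | n :: rest =>
    let names0 := get_chunk_names_for_dataset_py rest
    (PySem.List.pyRange 0 n 1).foldl (fun names i =>
      names0.foldl (fun names name0 => names ++ [PySem.Int.toStr i ++ "." ++ name0]) names) []

-- ===== PORT B =====
-- B short-circuits shapes with an empty dimension, then starts from the first dimension's
-- names and extends every prefix with each index of the next dimension.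
def get_chunk_names_for_dataset_py_alt (chunk_coords_shape : List Int) : List String :=
  match chunk_coords_shape with
  | [] => ["0"]
  | s0 :: rest =>
    if (s0 :: rest).any (fun s => decide (s ≤ 0)) then []
    else rest.foldl (fun names s =>
      names.flatMap (fun p => (PySem.List.pyRange 0 s 1).map (fun i => p ++ "." ++ PySem.Int.toStr i)))
      ((PySem.List.pyRange 0 s0 1).map (fun i => PySem.Int.toStr i))

-- ===== PRECONDITION & SPEC =====
def Spec_get_chunk_names_for_dataset_py (chunk_coords_shape : List Int) (out : List String) : Prop := out = get_chunk_names_for_dataset_py_alt chunk_coords_shape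
instance (chunk_coords_shape : List Int) (out : List String) : Decidable (Spec_get_chunk_names_for_dataset_py chunk_coords_shape out) := by unfold Spec_get_chunk_names_for_dataset_py; infer_instance

-- ===== CLAIM (what is proved, stated in full; the proofs are below) =====
def Claim_equal_get_chunk_names_for_dataset_py : Prop := ∀ (chunk_coords_shape : List Int), Dom_get_chunk_names_for_dataset_py chunk_coords_shape → Spec_get_chunk_names_for_dataset_py chunk_coords_shape (get_chunk_names_for_dataset_py chunk_coords_shape)

-- ===== LEMMAS AND PROOFS =====

lemma flatten_map_singleton {α β : Type} (l : List α) (f : α → β) :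
    (l.map (fun a => [f a])).flatten = l.map f := by
  induction l with | nil => rfl | cons a t ih => simp [ih]

-- A on a non-singleton cons, rewritten from nested foldl-append to flatMap/map.
lemma portA_cons (n : Int) (rest : List Int) (h : rest ≠ []) :
    get_chunk_names_for_dataset_py (n :: rest) =
      (PySem.List.pyRange 0 n 1).flatMap
        (fun i => (get_chunk_names_for_dataset_py rest).map (fun name0 => PySem.Int.toStr i ++ "." ++ name0)) := by
  match rest, h with
  | r0 :: rs, _ =>
    show (PySem.List.pyRange 0 n 1).foldl _ [] = _
    have : ∀ (i : Int) (acc : List String),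
        (get_chunk_names_for_dataset_py (r0 :: rs)).foldl
          (fun names name0 => names ++ [PySem.Int.toStr i ++ "." ++ name0]) acc
        = acc ++ (get_chunk_names_for_dataset_py (r0 :: rs)).map
            (fun name0 => PySem.Int.toStr i ++ "." ++ name0) := by
      intro i acc
      exact PySem.List.foldl_append_singleton_eq_map _ _ acc
    simp only [this]
    exact PySem.List.foldl_append_eq_flatMap _ _ []

-- The names produced for the remaining dimensions, appended behind a given prefix.
def pvSuffix (rest : List Int) (p : String) : List String :=
  match rest with
  | [] => [p]
  | _ :: _ => (get_chunk_names_for_dataset_py rest).map (fun name0 => p ++ "." ++ name0)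

-- B's fold extends every current name with all suffix names for the remaining dimensions.
lemma foldB_eq (rest : List Int) : ∀ (names : List String),
    rest.foldl (fun names s =>
      names.flatMap (fun p => (PySem.List.pyRange 0 s 1).map (fun i => p ++ "." ++ PySem.Int.toStr i))) names
    = names.flatMap (pvSuffix rest) := by
  induction rest with
  | nil =>
    intro names
    rw [show pvSuffix [] = fun p => [p] from funext fun p => rfl]
    simp
  | cons s rest ih =>
    intro names
    rw [List.foldl_cons, ih, List.flatMap_assoc]
    refine List.flatMap_congr (fun p _ => ?_)
    cases rest with
    | nil =>
      show (((PySem.List.pyRange 0 s 1).map (fun i => p ++ "." ++ PySem.Int.toStr i)).map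
        (fun a => [a])).flatten = _
      rw [flatten_map_singleton]
      simp [pvSuffix, get_chunk_names_for_dataset_py, List.map_map, Function.comp_def]
    | cons r0 rs =>
      show ((PySem.List.pyRange 0 s 1).map (fun i => p ++ "." ++ PySem.Int.toStr i)).flatMap
            (pvSuffix (r0 :: rs)) = _
      rw [List.flatMap_map]
      show _ = (get_chunk_names_for_dataset_py (s :: r0 :: rs)).map (fun name0 => p ++ "." ++ name0)
      rw [portA_cons s (r0 :: rs) (by simp), List.map_flatMap]
      refine List.flatMap_congr (fun i _ => ?_)
      simp [pvSuffix, List.map_map, Function.comp_def, String.append_assoc]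

-- If some dimension is ≤ 0, A produces no names (for a nonempty shape).
lemma portA_nil_of_nonpos : ∀ (shape : List Int), shape ≠ [] → (∃ s ∈ shape, s ≤ 0) →
    get_chunk_names_for_dataset_py shape = [] := by
  intro shape
  induction shape with
  | nil => intro h; exact absurd rfl h
  | cons n rest ih =>
    intro _ h
    obtain ⟨s, hs, hs0⟩ := h
    cases rest with
    | nil =>
      simp only [List.mem_singleton] at hs
      subst hs
      show (PySem.List.pyRange 0 s 1).map _ = []
      rw [PySem.List.pyRange_one_eq_nil (by omega)]
      rfl
    | cons r0 rs =>
      rw [portA_cons n (r0 :: rs) (by simp)]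
      rcases List.mem_cons.mp hs with rfl | hs
      · rw [PySem.List.pyRange_one_eq_nil (by omega)]
        rfl
      · rw [ih (by simp) ⟨s, hs, hs0⟩]
        simp

-- ===== VERDICT (by name: the statement is the Claim_ definition above) =====
theorem get_chunk_names_for_dataset_py_spec : Claim_equal_get_chunk_names_for_dataset_py := by
  intro shape _
  show get_chunk_names_for_dataset_py shape = get_chunk_names_for_dataset_py_alt shape
  cases shape with
  | nil => rfl
  | cons s0 rest =>
    show _ = if (s0 :: rest).any (fun s => decide (s ≤ 0)) then [] else rest.foldl _ _
    by_cases hz : (s0 :: rest).any (fun s => decide (s ≤ 0)) = true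
    · rw [if_pos hz]
      refine portA_nil_of_nonpos _ (by simp) ?_
      simpa using hz
    · rw [if_neg hz]
      rw [foldB_eq, List.flatMap_map]
      cases rest with
      | nil =>
        show (PySem.List.pyRange 0 s0 1).map (fun i => PySem.Int.toStr i)
          = (PySem.List.pyRange 0 s0 1).flatMap (fun a => [PySem.Int.toStr a])
        rw [List.flatMap_def, flatten_map_singleton]
      | cons r0 rs =>
        rw [portA_cons s0 (r0 :: rs) (by simp)]
        rfl
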